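-- pv_equiv track=rewrite | github.com/326-T/pytorch-sound3 | src/modules/myfunc.py | optional_split
-- ===== SOURCE A (Python) =====
-- def optional_split(line, key, place):
--     temp = line.split(key)
--
--     if place < 0:
--         place = place + len(temp)
--
--     if place <= 0:
--         first = line
--         latter = ''
--
--     elif place >= len(temp):
--         first = ''
--         latter = line
--
--     else:
--         first = temp[0]
--         latter = temp[place]
--         for i in range(1,place):
--             first += key + temp[i]
--         for i in range(place+1, len(temp)):
--             latter += key + temp[i]
--
--     return first, latter
-- ===== SOURCE B (Python) =====
-- def optional_split(line, key, place):
--     temp = line.split(key)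
--     n = len(temp)
--     if place < 0:
--         place += n
--     if place <= 0:
--         return line, ''
--     if place >= n:
--         return '', line
--     cut = sum(len(t) for t in temp[:place]) + len(key) * (place - 1)
--     return line[:cut], line[cut + len(key):]
-- ===== Notes on version B (the rewrite author's own statement) =====
-- stated objective: alternative
-- what changed: Instead of rebuilding both halves by repeatedly concatenating split parts with the key, B computes the cut position of the place-th separator arithmetically (sum of part lengths plus key lengths) and slices the original line once.
import Mathlib
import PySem

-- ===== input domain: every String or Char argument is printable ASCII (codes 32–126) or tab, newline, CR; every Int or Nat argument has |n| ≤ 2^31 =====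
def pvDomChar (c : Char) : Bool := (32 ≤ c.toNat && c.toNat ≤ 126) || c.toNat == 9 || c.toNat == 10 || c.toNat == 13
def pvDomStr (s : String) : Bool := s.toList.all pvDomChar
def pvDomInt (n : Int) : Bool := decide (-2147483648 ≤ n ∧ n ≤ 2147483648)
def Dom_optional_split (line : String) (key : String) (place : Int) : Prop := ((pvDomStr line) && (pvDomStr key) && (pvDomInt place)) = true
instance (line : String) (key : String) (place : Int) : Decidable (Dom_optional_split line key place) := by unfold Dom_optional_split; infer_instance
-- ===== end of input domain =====

-- B slices the original line at an arithmetically computed cut position instead of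
-- rebuilding both halves by repeated concatenation of the split parts (objective: alternative).

-- ===== PORT A =====
-- line.split(key) raises ValueError iff key = "" (split? = none); that input is excluded by Pre_.
def optional_split (line : String) (key : String) (place : Int) : String × String :=
  match PySem.Chars.split? line.toList key.toList with
  | none => ("", "")  -- ValueError in Python; outside Pre_
  | some temp =>
    let place1 : Int := if place < 0 then place + (temp.length : Int) else place
    if place1 ≤ 0 then (line, "")
    else if (temp.length : Int) ≤ place1 then ("", line)
    else
      let first := (PySem.List.pyRange 1 place1).foldl
          (fun acc i => acc ++ key.toList ++ PySem.List.pyGetD temp i []) (PySem.List.pyGetD temp 0 [])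
      let latter := (PySem.List.pyRange (place1 + 1) (temp.length : Int)).foldl
          (fun acc i => acc ++ key.toList ++ PySem.List.pyGetD temp i []) (PySem.List.pyGetD temp place1 [])
      (String.ofList first, String.ofList latter)

-- ===== PORT B =====
def optional_split_alt (line : String) (key : String) (place : Int) : String × String :=
  match PySem.Chars.split? line.toList key.toList with
  | none => ("", "")  -- ValueError in Python; outside Pre_
  | some temp =>
    let place1 : Int := if place < 0 then place + (temp.length : Int) else place
    if place1 ≤ 0 then (line, "")
    else if (temp.length : Int) ≤ place1 then ("", line)
    else
      let cut : Int := (((temp.take place1.toNat).map List.length).sum : Int)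
                        + (key.toList.length : Int) * (place1 - 1)
      (String.ofList (PySem.List.slice line.toList none (some cut)),
       String.ofList (PySem.List.slice line.toList (some (cut + (key.toList.length : Int))) none))

-- ===== PRECONDITION & SPEC =====
-- Pre_ excludes exactly key = "", where Python's str.split raises ValueError in both A and B.
def Pre_optional_split (_line : String) (key : String) (_place : Int) : Prop := key ≠ ""
instance (line : String) (key : String) (place : Int) : Decidable (Pre_optional_split line key place) := by unfold Pre_optional_split; infer_instance
def pvWitness_optional_split : String × String × Int := ("a,b,c", ",", 1)

def Spec_optional_split (line : String) (key : String) (place : Int) (out : String × String) : Prop := out = optional_split_alt line key place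
instance (line : String) (key : String) (place : Int) (out : String × String) : Decidable (Spec_optional_split line key place out) := by unfold Spec_optional_split; infer_instance

-- ===== CLAIM (what is proved, stated in full; the proofs are below) =====
def Claim_equal_optional_split : Prop := ∀ (line : String) (key : String) (place : Int), Dom_optional_split line key place → Pre_optional_split line key place → Spec_optional_split line key place (optional_split line key place)

-- ===== LEMMAS AND PROOFS =====

-- J (X ++ [a, b]) = J (X ++ [a ++ sep ++ b])
theorem pv_join_merge (sep : List Char) (X : List (List Char)) (a b : List Char) :
    PySem.Chars.join sep (X ++ [a, b]) = PySem.Chars.join sep (X ++ [a ++ sep ++ b]) := by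
  induction X with
  | nil => simp [PySem.Chars.join_cons_cons, PySem.Chars.join_singleton, List.append_assoc]
  | cons x X ih =>
    cases X with
    | nil =>
      simp [PySem.Chars.join_cons_cons, PySem.Chars.join_singleton, List.append_assoc]
    | cons y Y =>
      simp only [List.cons_append, PySem.Chars.join_cons_cons] at *
      simp [ih]

-- J (Y ++ [z]) = J Y ++ sep ++ z for nonempty Y
theorem pv_join_snoc (sep : List Char) (Y : List (List Char)) (z : List Char) (h : Y ≠ []) :
    PySem.Chars.join sep (Y ++ [z]) = PySem.Chars.join sep Y ++ sep ++ z := by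
  induction Y with
  | nil => exact absurd rfl h
  | cons y Y ih =>
    cases Y with
    | nil => simp [PySem.Chars.join_cons_cons, PySem.Chars.join_singleton]
    | cons w W =>
      rw [show (y :: w :: W) ++ [z] = y :: ((w :: W) ++ [z]) from rfl]
      rw [show ((w :: W) ++ [z] : List (List Char)) = w :: (W ++ [z]) from rfl,
        PySem.Chars.join_cons_cons,
        show (w :: (W ++ [z]) : List (List Char)) = (w :: W) ++ [z] from rfl,
        ih (by simp), PySem.Chars.join_cons_cons]
      simp [List.append_assoc]

-- characterisation of splitOn.go through join
theorem pv_go_join (sep : List Char) (hsep : sep ≠ []) :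
    ∀ (fuel : Nat) (l cur : List Char) (acc : List (List Char)), l.length ≤ fuel →
    PySem.Chars.join sep (PySem.Chars.splitOn.go sep fuel l cur acc)
      = PySem.Chars.join sep (acc.reverse ++ [cur.reverse ++ l]) := by
  intro fuel
  induction fuel with
  | zero =>
    intro l cur acc hl
    have : l = [] := List.eq_nil_of_length_eq_zero (Nat.le_zero.mp hl)
    subst this
    simp [PySem.Chars.splitOn.go]
  | succ fuel ih =>
    intro l cur acc hl
    cases l with
    | nil => simp [PySem.Chars.splitOn.go]
    | cons c rest =>
      rw [PySem.Chars.splitOn.go]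
      by_cases hp : sep.isPrefixOf (c :: rest) = true
      · rw [if_pos hp]
        have hpre : sep <+: (c :: rest) := List.isPrefixOf_iff_prefix.mp hp
        have hlen : sep.length ≤ (c :: rest).length := hpre.length_le
        have hdec : ((c :: rest).drop sep.length).length ≤ fuel := by
          have h1 : 1 ≤ sep.length := by
            cases sep with
            | nil => exact absurd rfl hsep
            | cons _ _ => simp
          simp only [List.length_drop]
          omega
        rw [ih _ [] _ hdec]
        have heq : (c :: rest) = sep ++ (c :: rest).drop sep.length := by
          obtain ⟨t, ht⟩ := hpre
          rw [← ht]; simp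
        have e1 : (cur.reverse :: acc).reverse ++ [([] : List Char).reverse ++ List.drop sep.length (c :: rest)]
            = acc.reverse ++ [cur.reverse, List.drop sep.length (c :: rest)] := by simp
        rw [e1, pv_join_merge]
        rw [show cur.reverse ++ c :: rest = cur.reverse ++ sep ++ List.drop sep.length (c :: rest) by
          rw [List.append_assoc, ← heq]]
      · rw [if_neg hp]
        rw [ih rest (c :: cur) acc (by simp only [List.length_cons] at hl; omega)]
        simp [List.append_assoc]

-- key.join(line.split(key)) = line
theorem pv_join_splitOn (s sep : List Char) (hsep : sep ≠ []) :
    PySem.Chars.join sep (PySem.Chars.splitOn s sep) = s := by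
  rw [PySem.Chars.splitOn, pv_go_join sep hsep (s.length + 1) s [] [] (by omega)]
  simp [PySem.Chars.join_singleton]

-- splitting a join at an interior index
theorem pv_join_take_drop (sep : List Char) :
    ∀ (p : Nat) (xs : List (List Char)), 0 < p → p < xs.length →
    PySem.Chars.join sep xs
      = PySem.Chars.join sep (xs.take p) ++ sep ++ PySem.Chars.join sep (xs.drop p) := by
  intro p
  induction p with
  | zero => intro xs h; omega
  | succ p ih =>
    intro xs _ hlt
    cases xs with
    | nil => simp at hlt
    | cons x xs =>
      cases Nat.eq_zero_or_pos p with
      | inl hz =>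
        subst hz
        cases xs with
        | nil => simp at hlt
        | cons y ys =>
          simp [PySem.Chars.join_cons_cons, PySem.Chars.join_singleton]
      | inr hpos =>
        have hlt' : p < xs.length := by simpa using Nat.lt_of_succ_lt_succ hlt
        have hxs : xs ≠ [] := by intro h; rw [h] at hlt'; simp at hlt'
        have htake : xs.take p ≠ [] := by
          intro h
          have := congrArg List.length h
          simp [Nat.min_eq_left (Nat.le_of_lt hlt')] at this
          omega
        cases xs with
        | nil => exact absurd rfl hxs
        | cons y ys =>
          rw [PySem.Chars.join_cons_cons, ih (y :: ys) hpos hlt']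
          have : (x :: y :: ys).take (p + 1) = x :: (y :: ys).take p := by simp
          rw [this]
          cases hc : (y :: ys).take p with
          | nil => exact absurd hc htake
          | cons z zs =>
            rw [hc] at *
            rw [PySem.Chars.join_cons_cons]
            simp [List.append_assoc]

-- length of a join of a nonempty list
theorem pv_length_join (sep : List Char) :
    ∀ (xs : List (List Char)), xs ≠ [] →
    (PySem.Chars.join sep xs).length = (xs.map List.length).sum + sep.length * (xs.length - 1) := by
  intro xs
  induction xs with
  | nil => intro h; exact absurd rfl h
  | cons x xs ih =>
    intro _
    cases xs with
    | nil => simp [PySem.Chars.join_singleton]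
    | cons y ys =>
      rw [PySem.Chars.join_cons_cons]
      have := ih (by simp)
      simp only [List.length_append, this, List.map_cons, List.sum_cons, List.length_cons,
        Nat.add_sub_cancel, Nat.mul_succ]
      omega

-- A's accumulation loop over range(a+1, b) computes the join of the segment [a, b)
theorem pv_foldl_seg (sep : List Char) (xs : List (List Char)) :
    ∀ (b a : Nat), a < b → b ≤ xs.length →
    (PySem.List.pyRange ((a : Int) + 1) (b : Int)).foldl
        (fun acc i => acc ++ sep ++ PySem.List.pyGetD xs i []) (PySem.List.pyGetD xs (a : Int) [])
      = PySem.Chars.join sep ((xs.drop a).take (b - a)) := by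
  intro b
  induction b with
  | zero => intro a h; omega
  | succ b ih =>
    intro a hab hble
    cases Nat.lt_or_ge a b with
    | inr hge =>
      -- a = b : range(a+1, a+1) is empty
      have hab' : a = b := by omega
      subst hab'
      have hc : ((a : Int) + 1) = ((a + 1 : Nat) : Int) := by push_cast; ring
      rw [hc]
      have hr : PySem.List.pyRange ((a + 1 : Nat) : Int) ((a + 1 : Nat) : Int) = [] := by
        simp [pysem]
      rw [hr]
      have ha : a < xs.length := by omega
      have hseg : (xs.drop a).take (a + 1 - a) = [xs[a]] := by
        have : a + 1 - a = 1 := by omega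
        rw [this, List.drop_eq_getElem_cons ha]
        rfl
      rw [hseg, List.foldl_nil, PySem.Chars.join_singleton,
        PySem.List.pyGetD_natCast, List.getD_eq_getElem _ _ ha]
    | inl hlt =>
      have hb : b < xs.length := by omega
      have hstep : ((b : Nat) : Int) + 1 = ((b + 1 : Nat) : Int) := by push_cast; ring
      have hr : PySem.List.pyRange ((a : Int) + 1) ((b + 1 : Nat) : Int)
          = PySem.List.pyRange ((a : Int) + 1) (b : Int) ++ [(b : Int)] := by
        rw [← hstep]
        exact PySem.List.pyRange_one_succ_right (by exact_mod_cast hlt)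
      rw [hr, List.foldl_append, ih a hlt (by omega)]
      simp only [List.foldl_cons, List.foldl_nil]
      have htake : (xs.drop a).take (b + 1 - a) = (xs.drop a).take (b - a) ++ [xs[b]] := by
        have h1 : b + 1 - a = (b - a) + 1 := by omega
        rw [h1, List.take_add_one]
        have hidx : b - a < (xs.drop a).length := by simp; omega
        have : (xs.drop a)[b - a]? = some xs[b] := by
          rw [List.getElem?_eq_getElem hidx]
          congr 1
          rw [List.getElem_drop]
          congr 1
          omega
        simp [this]
      rw [htake]
      have hne : (xs.drop a).take (b - a) ≠ [] := by
        intro h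
        have := congrArg List.length h
        simp at this
        omega
      rw [pv_join_snoc sep _ _ hne, PySem.List.pyGetD_natCast, List.getD_eq_getElem _ _ hb]

-- ===== VERDICT (by name: the statement is the Claim_ definition above) =====
theorem optional_split_spec : Claim_equal_optional_split := by
  intro line key place _hdom hpre
  unfold Spec_optional_split optional_split optional_split_alt
  have hkey : key.toList ≠ [] := by
    intro h
    apply hpre
    have := congrArg String.ofList h
    simpa using this
  have hsplit : PySem.Chars.split? line.toList key.toList
      = some (PySem.Chars.splitOn line.toList key.toList) := by
    simp [PySem.Chars.split?, List.isEmpty_iff, hkey]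
  simp only [hsplit]
  generalize htemp : PySem.Chars.splitOn line.toList key.toList = temp at hsplit ⊢
  generalize hplace1 : (if place < 0 then place + (temp.length : Int) else place) = place1
  by_cases h1 : place1 ≤ 0
  · rw [if_pos h1, if_pos h1]
  · rw [if_neg h1, if_neg h1]
    by_cases h2 : (temp.length : Int) ≤ place1
    · rw [if_pos h2, if_pos h2]
    · rw [if_neg h2, if_neg h2]
      push Not at h1 h2
      set sep := key.toList with hsep
      set p : Nat := place1.toNat with hp
      have hpcast : (p : Int) = place1 := Int.toNat_of_nonneg (by omega)
      have hp1 : 1 ≤ p := by omega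
      have hpn : p < temp.length := by
        have : (p : Int) < (temp.length : Int) := by rw [hpcast]; exact h2
        exact_mod_cast this
      have hjoin : PySem.Chars.join sep temp = line.toList := by
        rw [← htemp]; exact pv_join_splitOn _ _ hkey
      have hsplit2 : line.toList
          = PySem.Chars.join sep (temp.take p) ++ sep ++ PySem.Chars.join sep (temp.drop p) := by
        rw [← hjoin]
        exact pv_join_take_drop sep p temp (by omega) hpn
      -- A's two folds compute the joins of the two segments
      have hfirstA : (PySem.List.pyRange 1 place1).foldl
          (fun acc i => acc ++ sep ++ PySem.List.pyGetD temp i []) (PySem.List.pyGetD temp 0 [])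
          = PySem.Chars.join sep (temp.take p) := by
        have h := pv_foldl_seg sep temp p 0 (by omega) (by omega)
        simp only [Nat.cast_zero, zero_add, Nat.sub_zero, List.drop_zero] at h
        rw [← h, hpcast]
      have hlatterA : (PySem.List.pyRange (place1 + 1) (temp.length : Int)).foldl
          (fun acc i => acc ++ sep ++ PySem.List.pyGetD temp i []) (PySem.List.pyGetD temp place1 [])
          = PySem.Chars.join sep (temp.drop p) := by
        have h := pv_foldl_seg sep temp temp.length p hpn (by omega)
        rw [List.take_of_length_le (by simp)] at h
        rw [← h, hpcast]
      -- B's cut equals the length of the first join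
      have htne : temp.take p ≠ [] := by
        intro h
        have := congrArg List.length h
        simp [Nat.min_eq_left (Nat.le_of_lt hpn)] at this
        omega
      have hcut : ((((temp.take p).map List.length).sum : Int) + (sep.length : Int) * (place1 - 1))
          = ((PySem.Chars.join sep (temp.take p)).length : Int) := by
        rw [pv_length_join sep _ htne]
        have hlt : (temp.take p).length = p := by
          simp [Nat.min_eq_left (Nat.le_of_lt hpn)]
        rw [hlt, ← hpcast]
        push_cast [Nat.cast_sub hp1]
        ring
      set X := PySem.Chars.join sep (temp.take p) with hX
      set Y := PySem.Chars.join sep (temp.drop p) with hY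
      have hcut0 : (0 : Int) ≤ (((temp.take p).map List.length).sum : Int) + (sep.length : Int) * (place1 - 1) := by
        rw [hcut]; positivity
      have hfirstB : PySem.List.slice line.toList none
          (some ((((temp.take p).map List.length).sum : Int) + (sep.length : Int) * (place1 - 1))) = X := by
        rw [PySem.List.slice_to _ hcut0, hcut]
        simp only [Int.toNat_natCast]
        rw [hsplit2, List.append_assoc]
        exact List.take_left' rfl
      have hlatterB : PySem.List.slice line.toList
          (some ((((temp.take p).map List.length).sum : Int) + (sep.length : Int) * (place1 - 1) + (sep.length : Int))) none = Y := by
        rw [PySem.List.slice_from _ (by omega), hcut]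
        have he : (((X.length : Int)) + (sep.length : Int)).toNat = (X ++ sep).length := by
          rw [List.length_append]; omega
        rw [he, hsplit2]
        exact List.drop_left
      rw [hfirstA, hlatterA, hfirstB, hlatterB]
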